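-- pv_equiv track=rewrite | github.com/daenawesome/daenawesome.github.io | CSE 212/FINAL/Python Files/Solutions/02-setSolution-1.py | count_unique_words
-- ===== SOURCE A (Python) =====
-- def count_unique_words(text):
--     # Step 1: Initialize sets to store unique and duplicate words
--     unique_words = set()
--     duplicate_words = set()
--
--     # Step 2: Convert the text to lowercase
--     text = text.lower()
--
--     # Step 3: Split the text into lines
--     lines = text.splitlines()
--
--     # Step 5: Iterate over each line
--     for line in lines:
--         # Step 5.1: Split the line into words
--         words = line.split()
--
--         # Step 5.2: Iterate over each word
--         for word in words:
--             # Step 5.2.1: Remove non-alphabetic characters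
--             word = ''.join(c for c in word if c.isalpha())
--
--             # Step 5.2.2: Check if the word is not empty
--             if word:
--                 # Step 5.2.3: Check if the word is already in unique_words
--                 if word in unique_words:
--                     # If it is, add it to duplicate_words
--                     duplicate_words.add(word)
--                 else:
--                     # If it is not, add it to unique_words
--                     unique_words.add(word)
--
--     # Step 6: Calculate the number of unique words
--     unique_count = len(unique_words)
--
--     # Step 7: Calculate the number of duplicate words
--     duplicate_count = len(duplicate_words)
--
--     # Step 8: Calculate the number of non-unique words
--     non_unique_count = len(unique_words) + len(duplicate_words)
--
--     # Step 9: Return the counts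
--     return unique_count, duplicate_count, non_unique_count
-- ===== SOURCE B (Python) =====
-- def count_unique_words(text):
--     # Staged pipeline: materialize the cleaned token stream first, then
--     # aggregate by direct brute-force counting -- no incremental set state.
--     cleaned = [''.join(c for c in tok if c.isalpha())
--                for line in text.lower().splitlines()
--                for tok in line.split()]
--     words = [w for w in cleaned if w]
--     distinct = set(words)
--     unique_count = len(distinct)
--     duplicate_count = sum(1 for w in distinct if words.count(w) >= 2)
--     return unique_count, duplicate_count, unique_count + duplicate_count
-- ===== Notes on version B (the rewrite author's own statement) =====
-- stated objective: alternative
-- what changed: Replaces A's single pass with incremental two-set membership state by a staged pipeline: first materialize the cleaned word list with comprehensions, then aggregate it afterwards (unique = len(set(words)), duplicates = number of distinct words whose words.count is >= 2) -- trading A's O(n) incremental hashing for stateless brute-force counting.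
import Mathlib
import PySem

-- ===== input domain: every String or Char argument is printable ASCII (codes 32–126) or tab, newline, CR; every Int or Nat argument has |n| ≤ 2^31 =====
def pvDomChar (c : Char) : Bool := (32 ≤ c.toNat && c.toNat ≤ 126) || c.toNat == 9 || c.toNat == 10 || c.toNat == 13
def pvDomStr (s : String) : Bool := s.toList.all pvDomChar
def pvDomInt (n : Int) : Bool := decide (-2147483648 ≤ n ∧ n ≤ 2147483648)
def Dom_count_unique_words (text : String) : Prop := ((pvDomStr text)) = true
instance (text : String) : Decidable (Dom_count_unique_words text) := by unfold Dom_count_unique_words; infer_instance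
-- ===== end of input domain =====

-- B replaces A's incremental two-set single pass by a staged pipeline: materialize
-- the cleaned word list, then aggregate it by brute-force counting (objective: alternative).


-- ===== PORT A =====
-- body of A's inner loop: clean the word, then the two-set membership branch
def pvStepA (st : PySem.Set (List Char) × PySem.Set (List Char)) (word : List Char) :
    PySem.Set (List Char) × PySem.Set (List Char) :=
  let w := word.filter PySem.Chars.isalpha
  if w ≠ [] then
    if PySem.Set.contains st.1 w then (st.1, PySem.Set.add st.2 w)
    else (PySem.Set.add st.1 w, st.2)
  else st

def count_unique_words (text : String) : Int × Int × Int :=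
  let st := (PySem.Chars.splitlines (PySem.Chars.lower text.toList)).foldl
    (fun st line => (PySem.Chars.split₀ line).foldl pvStepA st)
    (PySem.Set.empty, PySem.Set.empty)
  (PySem.Set.len st.1, PySem.Set.len st.2, PySem.Set.len st.1 + PySem.Set.len st.2)

-- ===== PORT B =====
-- ''.join(c for c in tok if c.isalpha())
def pvClean (tok : List Char) : List Char := tok.filter PySem.Chars.isalpha

def count_unique_words_alt (text : String) : Int × Int × Int :=
  let cleaned := ((PySem.Chars.splitlines (PySem.Chars.lower text.toList)).flatMap
    PySem.Chars.split₀).map pvClean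
  let words := cleaned.filter (fun w => decide (w ≠ []))
  let distinct := PySem.Set.ofList words
  let uniqueCount : Int := PySem.Set.len distinct
  let duplicateCount : Int :=
    (distinct.map (fun w => if 2 ≤ words.count w then (1 : Int) else 0)).sum
  (uniqueCount, duplicateCount, uniqueCount + duplicateCount)

-- ===== PRECONDITION & SPEC =====
def Spec_count_unique_words (text : String) (out : Int × Int × Int) : Prop := out = count_unique_words_alt text
instance (text : String) (out : Int × Int × Int) : Decidable (Spec_count_unique_words text out) := by unfold Spec_count_unique_words; infer_instance

-- ===== CLAIM =====
def Claim_equal_count_unique_words : Prop := ∀ (text : String), Dom_count_unique_words text → Spec_count_unique_words text (count_unique_words text)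

-- ===== LEMMAS AND PROOFS =====

-- ofList over an appended singleton is Set.add
lemma pv_ofList_append_singleton (p : List (List Char)) (w : List Char) :
    PySem.Set.ofList (p ++ [w]) = PySem.Set.add (PySem.Set.ofList p) w := by
  simp [PySem.Set.ofList_eq_foldl, List.foldl_append]

-- Main loop invariant: after processing word stream ws from A's state
-- (set(p), d) — where d records exactly the words occurring ≥ 2 times in p —
-- A's unique set is set(q) and the duplicate set records the ≥-2 words of q,
-- for q = p ++ the cleaned nonempty words of ws (B's staged word list).
lemma pv_main (ws : List (List Char)) : ∀ (p d : List (List Char)),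
    d.Nodup → (∀ x, x ∈ d ↔ 2 ≤ p.count x) →
    (ws.foldl pvStepA (PySem.Set.ofList p, d)).1 =
      PySem.Set.ofList (p ++ (ws.map pvClean).filter (fun w => decide (w ≠ []))) ∧
    (ws.foldl pvStepA (PySem.Set.ofList p, d)).2.Nodup ∧
    (∀ x, x ∈ (ws.foldl pvStepA (PySem.Set.ofList p, d)).2 ↔
      2 ≤ (p ++ (ws.map pvClean).filter (fun w => decide (w ≠ []))).count x) := by
  induction ws with
  | nil =>
    intro p d hnd hd
    exact ⟨by simp, hnd, by simpa using hd⟩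
  | cons word rest ih =>
    intro p d hnd hd
    obtain ⟨w, hwdef⟩ : ∃ w, word.filter PySem.Chars.isalpha = w := ⟨_, rfl⟩
    have hclean : pvClean word = w := hwdef
    have hstepA : pvStepA (PySem.Set.ofList p, d) word =
        (if w ≠ [] then
          if PySem.Set.contains (PySem.Set.ofList p) w then
            (PySem.Set.ofList p, PySem.Set.add d w)
          else (PySem.Set.add (PySem.Set.ofList p) w, d)
        else (PySem.Set.ofList p, d)) := by
      show (if word.filter PySem.Chars.isalpha ≠ [] then _ else _) = _
      rw [hwdef]
    by_cases hw : w = []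
    · rw [List.foldl_cons, hstepA, if_neg (fun h => h hw)]
      have := ih p d hnd hd
      simpa [hclean, hw] using this
    · rw [List.foldl_cons, hstepA, if_pos hw]
      have hfilter : ((word :: rest).map pvClean).filter (fun w => decide (w ≠ [])) =
          w :: ((rest.map pvClean).filter (fun w => decide (w ≠ []))) := by
        rw [List.map_cons, hclean, List.filter_cons, if_pos (by simp [hw])]
      rw [hfilter]
      by_cases hmem : w ∈ p
      · -- duplicate occurrence: A adds to the duplicate set
        have hcont : PySem.Set.contains (PySem.Set.ofList p) w = true :=
          (PySem.Set.contains_iff _ _).mpr ((PySem.Set.mem_ofList p w).mpr hmem)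
        have heq : PySem.Set.ofList (p ++ [w]) = PySem.Set.ofList p := by
          rw [pv_ofList_append_singleton, PySem.Set.add, hcont]
          rfl
        have hd' : ∀ x, x ∈ PySem.Set.add d w ↔ 2 ≤ (p ++ [w]).count x := by
          intro x
          rw [PySem.Set.mem_add]
          by_cases hx : x = w
          · have h1 : 1 ≤ p.count x := by
              rw [hx]; exact List.one_le_count_iff.mpr hmem
            simp [List.count_append, hx]; omega
          · simp [List.count_append, hx, hd x, Ne.symm hx]
        rw [if_pos hcont, ← heq]
        have := ih (p ++ [w]) (PySem.Set.add d w) (PySem.Set.nodup_add d w hnd) hd'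
        simpa only [List.append_assoc, List.singleton_append] using this
      · -- first occurrence: A adds to the unique set
        have hcont : PySem.Set.contains (PySem.Set.ofList p) w = false := by
          rw [← Bool.not_eq_true, PySem.Set.contains_iff, PySem.Set.mem_ofList]
          exact hmem
        have hd' : ∀ x, x ∈ d ↔ 2 ≤ (p ++ [w]).count x := by
          intro x
          by_cases hx : x = w
          · have h0 : p.count x = 0 := by
              rw [hx]; exact List.count_eq_zero.mpr hmem
            rw [hd x, List.count_append, h0, hx]; simp
          · simp [List.count_append, hd x, Ne.symm hx]
        rw [if_neg (by simp [hmem]), ← pv_ofList_append_singleton]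
        have := ih (p ++ [w]) d hnd hd'
        simpa only [List.append_assoc, List.singleton_append] using this

-- the duplicate set has the same length as the count-≥-2 part of the distinct words
lemma pv_dup_len (q d : List (List Char)) (hnd : d.Nodup)
    (hd : ∀ x, x ∈ d ↔ 2 ≤ q.count x) :
    d.length = ((PySem.Set.ofList q).countP (fun k => decide (2 ≤ q.count k))) := by
  rw [List.countP_eq_length_filter]
  apply List.Perm.length_eq
  rw [List.perm_ext_iff_of_nodup hnd ((PySem.Set.nodup_ofList q).filter _)]
  intro x
  rw [hd x, List.mem_filter, PySem.Set.mem_ofList]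
  constructor
  · intro h
    exact ⟨List.count_pos_iff.mp (by omega), by simpa using h⟩
  · intro ⟨_, h⟩
    simpa using h

-- ===== VERDICT =====
theorem count_unique_words_spec : Claim_equal_count_unique_words := by
  intro text _
  unfold Spec_count_unique_words count_unique_words count_unique_words_alt
  dsimp only []
  -- flatten A's nested line/word loops to a single fold over B's token stream
  have hfold :
      (PySem.Chars.splitlines (PySem.Chars.lower text.toList)).foldl
        (fun st line => (PySem.Chars.split₀ line).foldl pvStepA st)
        (PySem.Set.empty, PySem.Set.empty) =
      ((PySem.Chars.splitlines (PySem.Chars.lower text.toList)).flatMap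
        PySem.Chars.split₀).foldl pvStepA (PySem.Set.empty, PySem.Set.empty) := by
    rw [List.flatMap_def, List.foldl_flatten, List.foldl_map]
  rw [hfold]
  set ws := (PySem.Chars.splitlines (PySem.Chars.lower text.toList)).flatMap
      PySem.Chars.split₀ with hws
  rw [show ((PySem.Set.empty, PySem.Set.empty) :
        PySem.Set (List Char) × PySem.Set (List Char)) =
      (PySem.Set.ofList [], ([] : List (List Char))) from rfl]
  obtain ⟨hu, hnd, hd⟩ := pv_main ws [] [] List.nodup_nil (by simp)
  simp only [List.nil_append] at hu hd
  set q := (ws.map pvClean).filter (fun w => decide (w ≠ [])) with hq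
  rw [hu]
  have hdup : ((PySem.Set.ofList q).map
        (fun w => if 2 ≤ q.count w then (1 : Int) else 0)).sum =
      PySem.Set.len (ws.foldl pvStepA (PySem.Set.ofList [], [])).2 := by
    have hcomp : (fun w => if 2 ≤ q.count w then (1 : Int) else 0) =
        fun w => if (fun k => decide (2 ≤ q.count k)) w = true then (1 : Int) else 0 := by
      funext k; simp
    rw [hcomp, PySem.List.sum_map_ite_one_zero, PySem.Set.len, ← pv_dup_len q _ hnd hd]
  simp only [Prod.mk.injEq, true_and]
  exact ⟨hdup.symm, by rw [hdup]⟩
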